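-- pv_equiv track=rewrite | github.com/alancast/LeetCodeProblems | python/medium/2411_smallest_subarray_with_maximum_bitwise_or.py | smallestSubarrays_brute_force
-- ===== SOURCE A (Python) =====
-- from typing import List
--
-- def smallestSubarrays_brute_force(nums: List[int]) -> List[int]:
--     n = len(nums)
--     answer = []
--
--     for i in range(n):
--         bitwise_or = nums[i]
--         max = 1
--         for j in range(i+1, n):
--             num_j = nums[j]
--             next_or = bitwise_or | num_j
--
--             if next_or > bitwise_or:
--                 max = j - i + 1
--
--             bitwise_or = next_or
--
--         answer.append(max)
--
--     return answer
-- ===== SOURCE B (Python) =====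
-- from typing import List
--
-- def smallestSubarrays_brute_force(nums: List[int]) -> List[int]:
--     # Right-to-left scan keeping, for each start i, the short list of distinct
--     # running-OR values of the suffix paired with the first index attaining each.
--     n = len(nums)
--     answer = [1] * n
--     ors = []  # for suffix starting at i+1: [(or_value, first index attaining it), ...]
--     for i in range(n - 1, -1, -1):
--         x = nums[i]
--         new_ors = [(x, i)]
--         last = x
--         for v, j in ors:
--             w = x | v
--             if w != last:
--                 new_ors.append((w, j))
--                 last = w
--         ors = new_ors
--         prev = ors[0][0]
--         best = 1
--         for v, j in ors[1:]:
--             if v > prev: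
--                 best = j - i + 1
--             prev = v
--         answer[i] = best
--     return answer
-- ===== Notes on version B (the rewrite author's own statement) =====
-- stated objective: faster
-- what changed: Replaced the O(n^2) restart-the-OR-scan-per-index brute force by a single right-to-left pass that maintains the (at most ~34-entry) list of distinct running-OR values of the current suffix with the first index attaining each, from which each answer is read off.
import Mathlib
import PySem

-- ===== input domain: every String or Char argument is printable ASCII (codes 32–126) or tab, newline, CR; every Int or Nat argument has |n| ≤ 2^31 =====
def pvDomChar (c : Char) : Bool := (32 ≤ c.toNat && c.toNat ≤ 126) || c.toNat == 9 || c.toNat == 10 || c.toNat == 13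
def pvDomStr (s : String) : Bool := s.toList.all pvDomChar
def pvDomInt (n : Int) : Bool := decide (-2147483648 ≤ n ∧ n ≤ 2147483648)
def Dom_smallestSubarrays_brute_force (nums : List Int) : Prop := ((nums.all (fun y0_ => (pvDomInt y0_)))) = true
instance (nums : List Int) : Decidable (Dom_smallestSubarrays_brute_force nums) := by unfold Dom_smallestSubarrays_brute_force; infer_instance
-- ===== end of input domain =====

-- B replaces A's O(n^2) per-index OR rescan by one right-to-left pass that keeps the list of
-- distinct running-OR values of the current suffix (objective: faster). Return values agree on
-- every input; only A's return value is compared (neither mutates its argument).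

-- ===== PORT A =====
def smallestSubarrays_brute_force (nums : List Int) : List Int :=
  let n : Int := PySem.List.len nums
  (PySem.List.pyRange 0 n 1).foldl (fun answer i =>
    let st := (PySem.List.pyRange (i+1) n 1).foldl (fun (s : Int × Int) j =>
      let num_j := PySem.List.pyGetD nums j 0
      let next_or := PySem.Int.bor s.1 num_j
      let mx := if next_or > s.1 then j - i + 1 else s.2
      (next_or, mx)) (PySem.List.pyGetD nums i 0, 1)
    answer ++ [st.2]) []

-- ===== PORT B =====
-- inner loop 'for v, j in ors' building new_ors (with its last value tracked in 'last')
def altStep (x i : Int) (ors : List (Int × Int)) : List (Int × Int) :=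
  (ors.foldl (fun (acc : List (Int × Int) × Int) vj =>
      let w := PySem.Int.bor x vj.1
      if w ≠ acc.2 then (acc.1 ++ [(w, vj.2)], w) else acc)
    ([(x, i)], x)).1

-- the 'for v, j in ors[1:]' loop computing best, with prev threaded through the state
def altBest (i : Int) (ors : List (Int × Int)) : Int :=
  match ors with
  | [] => 1
  | (v0, _) :: t =>
    (t.foldl (fun (s : Int × Int) vj =>
        (vj.1, if vj.1 > s.1 then vj.2 - i + 1 else s.2)) (v0, 1)).2

-- the 'for i in range(n-1, -1, -1)' loop: structural recursion over the suffix starting at i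
def altGo (i : Int) (l : List Int) : List (Int × Int) × List Int :=
  match l with
  | [] => ([], [])
  | x :: rest =>
    let pr := altGo (i + 1) rest
    let ors' := altStep x i pr.1
    (ors', altBest i ors' :: pr.2)

def smallestSubarrays_brute_force_alt (nums : List Int) : List Int := (altGo 0 nums).2

-- ===== PRECONDITION & SPEC =====
def Spec_smallestSubarrays_brute_force (nums : List Int) (out : List Int) : Prop := out = smallestSubarrays_brute_force_alt nums
instance (nums : List Int) (out : List Int) : Decidable (Spec_smallestSubarrays_brute_force nums out) := by unfold Spec_smallestSubarrays_brute_force; infer_instance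

-- ===== CLAIM (what is proved, stated in full; the proofs are below) =====
def Claim_equal_smallestSubarrays_brute_force : Prop := ∀ (nums : List Int), Dom_smallestSubarrays_brute_force nums → Spec_smallestSubarrays_brute_force nums (smallestSubarrays_brute_force nums)

-- ===== LEMMAS AND PROOFS =====

-- ---- bitwise-or algebra: PySem.Int.bor = Int.lor, associativity, idempotence ----

theorem pv_ldiff_add_and (n m : Nat) : Nat.ldiff n m + (n &&& m) = n := by
  induction n using Nat.binaryRec generalizing m with
  | zero =>
    have h1 : Nat.ldiff 0 m = 0 := Nat.eq_of_testBit_eq (by simp [Nat.testBit_ldiff])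
    simp [h1]
  | bit a n ih =>
    induction m using Nat.binaryRec with
    | zero =>
      have h1 : Nat.ldiff (Nat.bit a n) 0 = Nat.bit a n :=
        Nat.eq_of_testBit_eq (by simp [Nat.testBit_ldiff])
      simp [h1]
    | bit b m _ =>
      rw [Nat.ldiff_bit, Nat.land_bit]
      have := ih m
      simp only [Nat.bit_val]
      cases a <;> cases b <;> simp <;> omega

theorem pv_sub_and_eq_ldiff (n m : Nat) : n - (n &&& m) = Nat.ldiff n m := by
  have := pv_ldiff_add_and n m; omega

theorem pv_bor_eq_lor (a b : Int) : PySem.Int.bor a b = Int.lor a b := by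
  cases a with
  | ofNat m =>
    cases b with
    | ofNat n =>
      simp only [PySem.Int.bor, Int.lor]
      rw [if_pos (by simp only [Int.ofNat_eq_natCast]; omega),
          if_pos (by simp only [Int.ofNat_eq_natCast]; omega)]
      rfl
    | negSucc n =>
      simp only [PySem.Int.bor, Int.lor]
      rw [if_pos (by simp only [Int.ofNat_eq_natCast]; omega),
          if_neg (by simp only [Int.negSucc_eq]; omega)]
      have h1 : ((-Int.negSucc n - 1).toNat) = n := by simp only [Int.negSucc_eq]; omega
      have h2 : ((Int.ofNat m).toNat) = m := rfl
      rw [h1, h2, pv_sub_and_eq_ldiff]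
      rw [Int.negSucc_eq]; ring
  | negSucc m =>
    cases b with
    | ofNat n =>
      simp only [PySem.Int.bor, Int.lor]
      rw [if_neg (by simp only [Int.negSucc_eq]; omega),
          if_pos (by simp only [Int.ofNat_eq_natCast]; omega)]
      have h1 : ((-Int.negSucc m - 1).toNat) = m := by simp only [Int.negSucc_eq]; omega
      have h2 : ((Int.ofNat n).toNat) = n := rfl
      rw [h1, h2, pv_sub_and_eq_ldiff]
      rw [Int.negSucc_eq]; ring
    | negSucc n =>
      simp only [PySem.Int.bor, Int.lor]
      rw [if_neg (by simp only [Int.negSucc_eq]; omega),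
          if_neg (by simp only [Int.negSucc_eq]; omega)]
      have h1 : ((-Int.negSucc m - 1).toNat) = m := by simp only [Int.negSucc_eq]; omega
      have h2 : ((-Int.negSucc n - 1).toNat) = n := by simp only [Int.negSucc_eq]; omega
      rw [h1, h2]
      rw [Int.negSucc_eq]; ring

theorem pv_bor_self (a : Int) : PySem.Int.bor a a = a := by
  rw [pv_bor_eq_lor]
  cases a with
  | ofNat m =>
    show Int.ofNat (m ||| m) = Int.ofNat m
    congr 1
    exact Nat.eq_of_testBit_eq (by simp)
  | negSucc m =>
    show Int.negSucc (m &&& m) = Int.negSucc m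
    congr 1
    exact Nat.eq_of_testBit_eq (by simp)

theorem pv_bor_assoc (a b c : Int) :
    PySem.Int.bor (PySem.Int.bor a b) c = PySem.Int.bor a (PySem.Int.bor b c) := by
  simp only [pv_bor_eq_lor]
  cases a <;> cases b <;> cases c <;>
    (simp only [Int.lor]; congr 1;
     refine Nat.eq_of_testBit_eq fun i => ?_;
     simp only [Nat.testBit_lor, Nat.testBit_land, Nat.testBit_ldiff, Bool.not_or];
     simp [Bool.and_assoc, Bool.and_comm, Bool.or_assoc])

-- ---- proof-side characterisation of B's ors list ----

def condTail (x p : Int) (l : List Int) : List (Int × Int) :=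
  match l with
  | [] => []
  | y :: t =>
    let w := PySem.Int.bor x y
    if w = x then condTail x (p+1) t else (w, p) :: condTail w (p+1) t

def condList (i : Int) (l : List Int) : List (Int × Int) :=
  match l with
  | [] => []
  | x :: rest => (x, i) :: condTail x (i+1) rest

def bestCont (i x mx p : Int) (l : List Int) : Int :=
  match l with
  | [] => mx
  | y :: t =>
    let w := PySem.Int.bor x y
    bestCont i w (if w > x then p - i + 1 else mx) (p+1) t

def aList (i : Int) (l : List Int) : List Int :=
  match l with
  | [] => []
  | x :: rest => bestCont i x 1 (i+1) rest :: aList (i+1) rest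

def procX (x L : Int) (es : List (Int × Int)) : List (Int × Int) :=
  match es with
  | [] => []
  | (v, j) :: es' =>
    let w := PySem.Int.bor x v
    if w = L then procX x L es' else (w, j) :: procX x w es'

def tcd (L c q p : Int) (t : List Int) : List (Int × Int) :=
  match t with
  | [] => if PySem.Int.bor L c = L then [] else [(PySem.Int.bor L c, q)]
  | y :: t' =>
    if PySem.Int.bor c y = c then tcd L c q (p+1) t'
    else if PySem.Int.bor L c = L then tcd L (PySem.Int.bor c y) p (p+1) t'
    else (PySem.Int.bor L c, q) :: tcd (PySem.Int.bor L c) (PySem.Int.bor c y) p (p+1) t'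

-- B1: the altStep fold from a general accumulator
theorem pv_stepFold (x : Int) :
    ∀ (es : List (Int × Int)) (acc : List (Int × Int)) (L : Int),
    (es.foldl (fun (acc : List (Int × Int) × Int) vj =>
        let w := PySem.Int.bor x vj.1
        if w ≠ acc.2 then (acc.1 ++ [(w, vj.2)], w) else acc) (acc, L)).1
      = acc ++ procX x L es := by
  intro es
  induction es with
  | nil => intro acc L; simp [procX]
  | cons vj es' ih =>
    intro acc L
    obtain ⟨v, j⟩ := vj
    rw [List.foldl_cons]
    by_cases h : PySem.Int.bor x v = L
    · rw [show (let w := PySem.Int.bor x ((v, j) : Int × Int).1;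
          if w ≠ ((acc, L) : List (Int × Int) × Int).2
          then (((acc, L) : List (Int × Int) × Int).1 ++ [(w, ((v, j) : Int × Int).2)], w)
          else ((acc, L) : List (Int × Int) × Int)) = ((acc, L) : List (Int × Int) × Int) by
        simp [h]]
      rw [ih, procX]
      simp [h]
    · rw [show (let w := PySem.Int.bor x ((v, j) : Int × Int).1;
          if w ≠ ((acc, L) : List (Int × Int) × Int).2
          then (((acc, L) : List (Int × Int) × Int).1 ++ [(w, ((v, j) : Int × Int).2)], w)
          else ((acc, L) : List (Int × Int) × Int))
          = ((acc ++ [(PySem.Int.bor x v, j)], PySem.Int.bor x v) : List (Int × Int) × Int) by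
        simp [h]]
      rw [ih, procX]
      simp [h]

theorem pv_altStep_eq (x i : Int) (ors : List (Int × Int)) :
    altStep x i ors = (x, i) :: procX x x ors := by
  unfold altStep
  rw [pv_stepFold]
  rfl

-- B2: procX over a condensation list
theorem pv_procX_cond (x : Int) :
    ∀ (t : List Int) (c q p L : Int), PySem.Int.bor x c = PySem.Int.bor L c →
    procX x L ((c, q) :: condTail c p t) = tcd L c q p t := by
  intro t
  induction t with
  | nil =>
    intro c q p L h
    by_cases hL : PySem.Int.bor L c = L <;>
      simp [procX, condTail, tcd, h, hL]
  | cons y t' ih =>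
    intro c q p L h
    by_cases hcy : PySem.Int.bor c y = c
    · rw [show condTail c p (y :: t') = condTail c (p+1) t' by rw [condTail]; simp [hcy]]
      rw [ih c q (p+1) L h]
      rw [tcd]; simp [hcy]
    · rw [show condTail c p (y :: t')
            = (PySem.Int.bor c y, p) :: condTail (PySem.Int.bor c y) (p+1) t' by
          rw [condTail]; simp [hcy]]
      by_cases hL : PySem.Int.bor L c = L
      · have hx : PySem.Int.bor x c = L := by rw [h, hL]
        rw [show procX x L ((c, q) :: (PySem.Int.bor c y, p) :: condTail (PySem.Int.bor c y) (p+1) t')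
              = procX x L ((PySem.Int.bor c y, p) :: condTail (PySem.Int.bor c y) (p+1) t') by
            rw [procX]; simp [hx]]
        rw [ih (PySem.Int.bor c y) p (p+1) L (by
          rw [← pv_bor_assoc, ← pv_bor_assoc, h])]
        rw [tcd]; simp [hcy, hL]
      · have hx : ¬ PySem.Int.bor x c = L := by rw [h]; exact hL
        rw [show procX x L ((c, q) :: (PySem.Int.bor c y, p) :: condTail (PySem.Int.bor c y) (p+1) t')
              = (PySem.Int.bor x c, q) ::
                procX x (PySem.Int.bor x c) ((PySem.Int.bor c y, p) :: condTail (PySem.Int.bor c y) (p+1) t') by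
            rw [procX]; simp [hx]]
        rw [ih (PySem.Int.bor c y) p (p+1) (PySem.Int.bor x c) (by
          rw [← pv_bor_assoc, ← pv_bor_assoc]
          rw [show PySem.Int.bor (PySem.Int.bor x c) c = PySem.Int.bor x c by
            rw [pv_bor_assoc, pv_bor_self]])]
        rw [tcd]; simp [hcy, hL, h]

-- B3: tcd is a condensation tail
theorem pv_tcd_eq :
    ∀ (t : List Int) (L c q p : Int),
    tcd L c q p t = if PySem.Int.bor L c = L then condTail L p t
                    else (PySem.Int.bor L c, q) :: condTail (PySem.Int.bor L c) p t := by
  intro t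
  induction t with
  | nil => intro L c q p; by_cases hL : PySem.Int.bor L c = L <;> simp [tcd, condTail, hL]
  | cons y t' ih =>
    intro L c q p
    by_cases hcy : PySem.Int.bor c y = c
    · rw [show tcd L c q p (y :: t') = tcd L c q (p+1) t' by rw [tcd]; simp [hcy]]
      rw [ih]
      by_cases hL : PySem.Int.bor L c = L
      · rw [if_pos hL, if_pos hL]
        have hLy : PySem.Int.bor L y = L := by
          conv_lhs => rw [← hL]
          rw [pv_bor_assoc, hcy, hL]
        rw [show condTail L p (y :: t') = condTail L (p+1) t' by rw [condTail]; simp [hLy]]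
      · rw [if_neg hL, if_neg hL]
        have hLy : PySem.Int.bor (PySem.Int.bor L c) y = PySem.Int.bor L c := by
          rw [pv_bor_assoc, hcy]
        rw [show condTail (PySem.Int.bor L c) p (y :: t')
              = condTail (PySem.Int.bor L c) (p+1) t' by rw [condTail]; simp [hLy]]
    · by_cases hL : PySem.Int.bor L c = L
      · rw [show tcd L c q p (y :: t') = tcd L (PySem.Int.bor c y) p (p+1) t' by
            rw [tcd]; simp [hcy, hL]]
        rw [ih]
        have hkey : PySem.Int.bor L (PySem.Int.bor c y) = PySem.Int.bor L y := by
          rw [← pv_bor_assoc, hL]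
        rw [hkey]
        rw [if_pos hL]
        rw [show condTail L p (y :: t')
              = if PySem.Int.bor L y = L then condTail L (p+1) t'
                else (PySem.Int.bor L y, p) :: condTail (PySem.Int.bor L y) (p+1) t' by
            rw [condTail]]
      · rw [show tcd L c q p (y :: t')
              = (PySem.Int.bor L c, q) :: tcd (PySem.Int.bor L c) (PySem.Int.bor c y) p (p+1) t' by
            rw [tcd]; simp [hcy, hL]]
        rw [ih]
        have hkey : PySem.Int.bor (PySem.Int.bor L c) (PySem.Int.bor c y)
            = PySem.Int.bor (PySem.Int.bor L c) y := by
          rw [pv_bor_assoc, ← pv_bor_assoc c c y, pv_bor_self, ← pv_bor_assoc]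
        rw [hkey]
        rw [if_neg hL]
        rw [show condTail (PySem.Int.bor L c) p (y :: t')
              = if PySem.Int.bor (PySem.Int.bor L c) y = PySem.Int.bor L c
                then condTail (PySem.Int.bor L c) (p+1) t'
                else (PySem.Int.bor (PySem.Int.bor L c) y, p)
                     :: condTail (PySem.Int.bor (PySem.Int.bor L c) y) (p+1) t' by
            rw [condTail]]

-- B4: the ors component of altGo
theorem pv_altGo_fst : ∀ (l : List Int) (i : Int), (altGo i l).1 = condList i l := by
  intro l
  induction l with
  | nil => intro i; simp [altGo, condList]
  | cons x rest ih =>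
    intro i
    show altStep x i (altGo (i+1) rest).1 = condList i (x :: rest)
    rw [ih]
    cases rest with
    | nil => simp [condList, pv_altStep_eq, procX, condTail]
    | cons y t =>
      rw [show condList (i+1) (y :: t) = (y, i+1) :: condTail y (i+1+1) t from rfl]
      rw [pv_altStep_eq, pv_procX_cond x t y (i+1) (i+1+1) x rfl, pv_tcd_eq]
      rw [show condList i (x :: y :: t) = (x, i) :: condTail x (i+1) (y :: t) from rfl]
      rw [show condTail x (i+1) (y :: t)
            = if PySem.Int.bor x y = x then condTail x (i+1+1) t
              else (PySem.Int.bor x y, i+1) :: condTail (PySem.Int.bor x y) (i+1+1) t by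
          rw [condTail]]

-- B5: the best scan over a condensation tail equals A's running scan
theorem pv_best_cond (i : Int) :
    ∀ (l : List Int) (x mx p : Int),
    ((condTail x p l).foldl (fun (s : Int × Int) vj =>
        (vj.1, if vj.1 > s.1 then vj.2 - i + 1 else s.2)) (x, mx)).2
      = bestCont i x mx p l := by
  intro l
  induction l with
  | nil => intro x mx p; simp [condTail, bestCont]
  | cons y t ih =>
    intro x mx p
    by_cases hxy : PySem.Int.bor x y = x
    · rw [show condTail x p (y :: t) = condTail x (p+1) t by rw [condTail]; simp [hxy]]
      rw [ih]
      conv_rhs => rw [bestCont]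
      simp [hxy]
    · rw [show condTail x p (y :: t)
            = (PySem.Int.bor x y, p) :: condTail (PySem.Int.bor x y) (p+1) t by
          rw [condTail]; simp [hxy]]
      simp only [List.foldl_cons]
      rw [ih]
      conv_rhs => rw [bestCont]

-- B6: the answers component of altGo
theorem pv_altGo_snd : ∀ (l : List Int) (i : Int), (altGo i l).2 = aList i l := by
  intro l
  induction l with
  | nil => intro i; simp [altGo, aList]
  | cons x rest ih =>
    intro i
    show altBest i (altStep x i (altGo (i+1) rest).1) :: (altGo (i+1) rest).2 = aList i (x :: rest)
    rw [ih]
    have h1 : altStep x i (altGo (i+1) rest).1 = (x, i) :: condTail x (i+1) rest := by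
      have := pv_altGo_fst (x :: rest) i
      rw [show (altGo i (x :: rest)).1 = altStep x i (altGo (i+1) rest).1 from rfl] at this
      rw [this]; rfl
    rw [h1]
    rw [aList]
    congr 1
    rw [altBest]
    exact pv_best_cond i rest x 1 (i+1)

-- ---- A-side: folding over pyRange with pyGetD is a fold over the enumerated suffix ----

theorem pv_foldl_pyRange_enum {β : Type} (xs : List Int) (g : β → Int × Int → β) :
    ∀ (fuel : Nat) (a : Nat) (init : β), xs.length ≤ a + fuel →
    (PySem.List.pyRange (a : Int) (PySem.List.len xs) 1).foldl
        (fun s j => g s (j, PySem.List.pyGetD xs j 0)) init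
      = (PySem.List.enumerate (xs.drop a) (a : Int)).foldl g init := by
  intro fuel
  induction fuel with
  | zero =>
    intro a init h
    rw [PySem.List.pyRange_one_eq_nil (by simp [PySem.List.len_eq]; omega)]
    rw [List.drop_eq_nil_of_le (by omega)]
    simp [PySem.List.enumerate]
  | succ fuel ih =>
    intro a init h
    by_cases ha : xs.length ≤ a
    · rw [PySem.List.pyRange_one_eq_nil (by simp [PySem.List.len_eq]; omega)]
      rw [List.drop_eq_nil_of_le (by omega)]
      simp [PySem.List.enumerate]
    · have halt : a < xs.length := by omega
      rw [PySem.List.pyRange_one_cons (by simp [PySem.List.len_eq]; omega)]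
      rw [List.foldl_cons]
      rw [List.drop_eq_getElem_cons halt]
      rw [PySem.List.enumerate_cons, List.foldl_cons]
      have hget : PySem.List.pyGetD xs (a : Int) 0 = xs[a] := by
        rw [PySem.List.pyGetD_natCast]
        exact List.getD_eq_getElem xs 0 halt
      rw [hget]
      have hcast : ((a : Int) + 1) = ((a + 1 : Nat) : Int) := by push_cast; ring
      rw [hcast, ih (a+1) (g init ((a : Int), xs[a])) (by omega)]

-- the inner loop of A equals bestCont
theorem pv_enum_fold_best (i : Int) :
    ∀ (l : List Int) (p x mx : Int),
    ((PySem.List.enumerate l p).foldl (fun (s : Int × Int) jy =>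
        (PySem.Int.bor s.1 jy.2,
         if PySem.Int.bor s.1 jy.2 > s.1 then jy.1 - i + 1 else s.2)) (x, mx)).2
      = bestCont i x mx p l := by
  intro l
  induction l with
  | nil => intro p x mx; simp [PySem.List.enumerate, bestCont]
  | cons y t ih =>
    intro p x mx
    rw [PySem.List.enumerate_cons, List.foldl_cons]
    rw [ih]
    rw [bestCont]

-- A equals aList
theorem pv_a_eq_aList (nums : List Int) : smallestSubarrays_brute_force nums = aList 0 nums := by
  unfold smallestSubarrays_brute_force
  rw [PySem.List.foldl_append_singleton_eq_map]
  rw [List.nil_append]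
  suffices h : ∀ (fuel : Nat) (a : Nat), nums.length ≤ a + fuel →
      (PySem.List.pyRange (a : Int) (PySem.List.len nums) 1).map
        (fun i => ((PySem.List.pyRange (i+1) (PySem.List.len nums) 1).foldl (fun (s : Int × Int) j =>
            let num_j := PySem.List.pyGetD nums j 0
            let next_or := PySem.Int.bor s.1 num_j
            let mx := if next_or > s.1 then j - i + 1 else s.2
            (next_or, mx)) (PySem.List.pyGetD nums i 0, 1)).2)
        = aList (a : Int) (nums.drop a) by
    have := h nums.length 0 (by omega)
    simpa using this
  intro fuel
  induction fuel with
  | zero =>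
    intro a h
    rw [PySem.List.pyRange_one_eq_nil (by simp [PySem.List.len_eq]; omega)]
    rw [List.drop_eq_nil_of_le (by omega)]
    simp [aList]
  | succ fuel ih =>
    intro a h
    by_cases ha : nums.length ≤ a
    · rw [PySem.List.pyRange_one_eq_nil (by simp [PySem.List.len_eq]; omega)]
      rw [List.drop_eq_nil_of_le (by omega)]
      simp [aList]
    · have halt : a < nums.length := by omega
      rw [PySem.List.pyRange_one_cons (by simp [PySem.List.len_eq]; omega)]
      rw [List.map_cons]
      rw [List.drop_eq_getElem_cons halt, aList]
      congr 1
      · -- head: the inner fold at index a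
        have hcast : ((a : Int) + 1) = ((a + 1 : Nat) : Int) := by push_cast; ring
        rw [hcast]
        rw [pv_foldl_pyRange_enum nums
            (fun (s : Int × Int) jy =>
              (PySem.Int.bor s.1 jy.2,
               if PySem.Int.bor s.1 jy.2 > s.1 then jy.1 - (a : Int) + 1 else s.2))
            nums.length (a+1) _ (by omega)]
        rw [pv_enum_fold_best]
        have hget : PySem.List.pyGetD nums (a : Int) 0 = nums[a] := by
          rw [PySem.List.pyGetD_natCast]
          exact List.getD_eq_getElem nums 0 halt
        rw [hget]
      · have hcast : ((a : Int) + 1) = ((a + 1 : Nat) : Int) := by push_cast; ring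
        rw [hcast, ih (a+1) (by omega)]

-- ===== VERDICT (by name: the statement is the Claim_ definition above) =====
theorem smallestSubarrays_brute_force_spec : Claim_equal_smallestSubarrays_brute_force := by
  intro nums _
  show smallestSubarrays_brute_force nums = smallestSubarrays_brute_force_alt nums
  rw [pv_a_eq_aList]
  unfold smallestSubarrays_brute_force_alt
  rw [pv_altGo_snd]
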